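-- pv_equiv track=rewrite | github.com/magicl/homefin | core/formatting.py | fmtGridsAssemble
-- ===== SOURCE A (Python) =====
-- from typing import Any
--
-- def fmtGridsAssemble(grids: list[list[list[Any]]]):
--     """
--     Creates a full grid of data based on input. Chunks is a 2D array of grids.
--     Restrictions:
--     - Grids are expected to match eachother. I.e. if two are next to eachother, their number of rows are expected to match.
--       if they are on top of eachother, their number of columns is expected to match
--     """
--
--     out: list[list[Any]] = []
--     for gridRow in grids:
--         row = None
--         for grid in gridRow:
--             if row is None:
--                 # Shallow 2d copy. No need to re-create inidividual values
--                 row = [list(r) for r in grid]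
--
--             else:
--                 if len(grid) != len(row):
--                     raise Exception('Height of grids next to eachother must match')
--
--                 # Add grid to current row
--                 for r, gr in zip(row, grid):
--                     r += gr  # pylint: disable=redefined-loop-name
--
--         if row is None:
--             continue
--
--         # Assemble rows
--         if out is None:
--             out = row
--
--         else:
--             out += row
--
--     return out
-- ===== SOURCE B (Python) =====
-- def fmtGridsAssemble(grids):
--     out = []
--     for gridRow in grids:
--         if not gridRow:
--             continue
--         h = len(gridRow[0])
--         for g in gridRow[1:]:
--             if len(g) != h:
--                 raise Exception('Height of grids next to eachother must match')
--         for i in range(h):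
--             combined = []
--             for g in gridRow:
--                 combined += g[i]
--             out.append(combined)
--     return out
-- ===== Notes on version B (the rewrite author's own statement) =====
-- stated objective: alternative
-- what changed: Replaced the accumulator style (copy the first grid, then zip-extend its rows with each later grid) by index-driven construction: validate heights up front, then for each row index i build a fresh combined row by concatenating g[i] over all grids in the gridRow.
import Mathlib
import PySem

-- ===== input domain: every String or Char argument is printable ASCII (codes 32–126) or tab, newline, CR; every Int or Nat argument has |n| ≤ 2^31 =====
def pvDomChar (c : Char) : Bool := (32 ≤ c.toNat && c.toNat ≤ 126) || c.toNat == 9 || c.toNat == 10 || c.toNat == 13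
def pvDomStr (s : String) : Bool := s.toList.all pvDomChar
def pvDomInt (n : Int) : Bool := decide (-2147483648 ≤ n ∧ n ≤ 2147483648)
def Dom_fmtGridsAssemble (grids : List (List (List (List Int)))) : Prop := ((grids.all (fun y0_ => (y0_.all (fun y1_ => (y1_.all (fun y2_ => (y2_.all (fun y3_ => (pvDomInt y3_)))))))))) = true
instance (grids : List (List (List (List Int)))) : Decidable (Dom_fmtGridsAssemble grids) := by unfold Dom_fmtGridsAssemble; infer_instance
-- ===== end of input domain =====

-- B replaces A's accumulator style (copy first grid, zip-extend its rows) by index-driven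
-- construction (for each row index, concatenate that row across the gridRow); same cost.

-- ===== PORT A =====
-- inner loop: row is None at first; first grid is shallow-copied; later grids are
-- zip-appended row-by-row (the mismatch branch, where Python raises, is outside Pre_).
def fmtGridsAssemble (grids : List (List (List (List Int)))) : List (List Int) :=
  grids.foldl (fun out gridRow =>
    match gridRow.foldl (fun row grid =>
        match row with
        | none => some (grid.map (fun r => r.map id))
        | some r =>
          if grid.length ≠ r.length then some r  -- Python raises here; excluded by Pre_
          else some (List.zipWith (fun a b => a ++ b) r grid)) none with
    | none => out
    | some r => out ++ r) []

-- ===== PORT B =====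
def fmtGridsAssemble_alt (grids : List (List (List (List Int)))) : List (List Int) :=
  grids.foldl (fun out gridRow =>
    match gridRow with
    | [] => out
    | g0 :: _ =>
      out ++ (List.range g0.length).map (fun i =>
        gridRow.foldl (fun combined g => combined ++ g.getD i []) [])) []

-- ===== PRECONDITION & SPEC =====
-- Pre_ excludes exactly the inputs where Python A raises its height-mismatch Exception:
-- within each gridRow every grid must have the same height as the first grid.
def Pre_fmtGridsAssemble (grids : List (List (List (List Int)))) : Prop :=
  ∀ gridRow ∈ grids, ∀ g ∈ gridRow, g.length = (gridRow.headD []).length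

instance (grids : List (List (List (List Int)))) : Decidable (Pre_fmtGridsAssemble grids) := by
  unfold Pre_fmtGridsAssemble; infer_instance

def pvWitness_fmtGridsAssemble : List (List (List (List Int))) :=
  [[[[1, 2], [3, 4]], [[5], [6]]], [], [[[7, 8, 9]]]]

def Spec_fmtGridsAssemble (grids : List (List (List (List Int)))) (out : List (List Int)) : Prop := out = fmtGridsAssemble_alt grids
instance (grids : List (List (List (List Int)))) (out : List (List Int)) : Decidable (Spec_fmtGridsAssemble grids out) := by unfold Spec_fmtGridsAssemble; infer_instance

-- ===== CLAIM (what is proved, stated in full; the proofs are below) =====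
def Claim_equal_fmtGridsAssemble : Prop := ∀ (grids : List (List (List (List Int)))), Dom_fmtGridsAssemble grids → Pre_fmtGridsAssemble grids → Spec_fmtGridsAssemble grids (fmtGridsAssemble grids)

-- ===== LEMMAS AND PROOFS =====

-- a list of length h equals the index-table of its entries
theorem table_of_getD (r : List (List Int)) :
    (List.range r.length).map (fun i => r.getD i []) = r := by
  apply List.ext_getElem
  · simp
  · intro i h1 h2
    simp [List.getD_eq_getElem?_getD, List.getElem?_eq_getElem h2]

theorem getD_zipWith_append (r g : List (List Int)) (i : ℕ)
    (hi : i < r.length) (hlen : g.length = r.length) :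
    (List.zipWith (fun a b => a ++ b) r g).getD i [] = r.getD i [] ++ g.getD i [] := by
  have hi' : i < g.length := hlen ▸ hi
  simp [List.getD_eq_getElem?_getD, List.getElem?_eq_getElem, hi, hi',
    List.getElem?_zipWith, (by omega : i < min r.length g.length)]

-- the zip-extend fold over gs equals the per-index concatenation fold, row by row
theorem inner_eq (gs : List (List (List Int))) (r : List (List Int)) (h : ℕ)
    (hr : r.length = h) (hgs : ∀ g ∈ gs, g.length = h) :
    gs.foldl (fun row grid =>
        match row with
        | none => some (grid.map (fun rr => rr.map id))
        | some rr =>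
          if grid.length ≠ rr.length then some rr
          else some (List.zipWith (fun a b => a ++ b) rr grid)) (some r)
      = some ((List.range h).map (fun i =>
          gs.foldl (fun combined g => combined ++ g.getD i []) (r.getD i []))) := by
  induction gs generalizing r with
  | nil =>
    simp only [List.foldl_nil, Option.some.injEq]
    rw [← hr, table_of_getD]
  | cons g gs ih =>
    have hg : g.length = h := hgs g (by simp)
    have hlen : g.length = r.length := by omega
    simp only [List.foldl_cons, hlen, ne_eq, not_true_eq_false, if_false]
    rw [ih _ ((List.length_zipWith ..).trans (by omega))
        (fun g' hg' => hgs g' (by simp [hg']))]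
    congr 1
    apply List.map_congr_left
    intro i hi
    simp only [List.mem_range] at hi
    rw [getD_zipWith_append r g i (by omega) hlen]

-- one gridRow produces the same block under both decompositions
theorem row_eq (gridRow : List (List (List Int)))
    (hpre : ∀ g ∈ gridRow, g.length = (gridRow.headD []).length) (out : List (List Int)) :
    (match gridRow.foldl (fun row grid =>
        match row with
        | none => some (grid.map (fun rr => rr.map id))
        | some rr =>
          if grid.length ≠ rr.length then some rr
          else some (List.zipWith (fun a b => a ++ b) rr grid)) none with
     | none => out
     | some r => out ++ r)
      = (match gridRow with
         | [] => out
         | g0 :: _ =>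
           out ++ (List.range g0.length).map (fun i =>
             gridRow.foldl (fun combined g => combined ++ g.getD i []) [])) := by
  cases gridRow with
  | nil => simp
  | cons g0 gs =>
    simp only [List.foldl_cons]
    have hcopy : g0.map (fun rr => rr.map id) = g0 := by simp
    rw [hcopy, inner_eq gs g0 g0.length rfl
        (fun g hg => by simpa using hpre g (by simp [hg]))]
    simp

theorem main_eq (grids : List (List (List (List Int))))
    (hpre : Pre_fmtGridsAssemble grids) :
    fmtGridsAssemble grids = fmtGridsAssemble_alt grids := by
  unfold fmtGridsAssemble fmtGridsAssemble_alt
  induction grids with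
  | nil => rfl
  | cons gr grs ih =>
    have hgr := hpre gr (by simp)
    have hpre' : Pre_fmtGridsAssemble grs := fun r hr => hpre r (by simp [hr])
    simp only [List.foldl_cons]
    rw [row_eq gr hgr []]
    -- both remaining folds only append to the accumulator; factor it out
    have factor : ∀ (l : List (List (List (List Int)))) (f : List (List Int) → List (List (List Int)) → List (List Int)),
        (∀ acc x, f acc x = acc ++ f [] x) →
        ∀ acc, l.foldl f acc = acc ++ l.foldl f [] := by
      intro l f hf
      induction l with
      | nil => simp
      | cons x xs ihx =>
        intro acc
        simp only [List.foldl_cons]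
        rw [ihx (f acc x), ihx (f [] x), hf acc x, List.append_assoc]
    have hfA : ∀ (acc : List (List Int)) (x : List (List (List Int))),
        (fun (out : List (List Int)) gridRow =>
          match gridRow.foldl (fun row grid =>
              match row with
              | none => some (grid.map (fun rr => rr.map id))
              | some rr =>
                if grid.length ≠ rr.length then some rr
                else some (List.zipWith (fun a b => a ++ b) rr grid)) none with
          | none => out
          | some r => out ++ r) acc x
        = acc ++ (fun (out : List (List Int)) gridRow =>
          match gridRow.foldl (fun row grid =>
              match row with
              | none => some (grid.map (fun rr => rr.map id))
              | some rr =>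
                if grid.length ≠ rr.length then some rr
                else some (List.zipWith (fun a b => a ++ b) rr grid)) none with
          | none => out
          | some r => out ++ r) [] x := by
      intro acc x
      have opt : ∀ (o : Option (List (List Int))),
          (match o with | none => acc | some r => acc ++ r)
            = acc ++ (match o with | none => ([] : List (List Int)) | some r => r) := by
        intro o; cases o <;> simp
      exact opt _
    have hfB : ∀ (acc : List (List Int)) (x : List (List (List Int))),
        (fun (out : List (List Int)) gridRow =>
          match gridRow with
          | [] => out
          | g0 :: _ =>
            out ++ (List.range g0.length).map (fun i =>
              gridRow.foldl (fun combined g => combined ++ g.getD i []) [])) acc x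
        = acc ++ (fun (out : List (List Int)) gridRow =>
          match gridRow with
          | [] => out
          | g0 :: _ =>
            out ++ (List.range g0.length).map (fun i =>
              gridRow.foldl (fun combined g => combined ++ g.getD i []) [])) [] x := by
      intro acc x; cases x <;> simp
    rw [factor _ _ hfA, factor _ _ hfB, ih hpre']
    cases gr <;> rfl

-- ===== VERDICT (by name: the statement is the Claim_ definition above) =====
theorem fmtGridsAssemble_spec : Claim_equal_fmtGridsAssemble := by
  intro grids _ hpre
  unfold Spec_fmtGridsAssemble
  exact main_eq grids hpre
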